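-- pv_equiv track=rewrite | github.com/RuijieZ/fighting_the_landloard_cardgame_analysis | card_one_deck.py | count_bomb
-- ===== SOURCE A (Python) =====
-- def count_bomb(cards):
-- 	d = {}
-- 	for i in cards:
-- 		if i in d:
-- 			d[i] += 1
-- 		else:
-- 			d[i] = 1
-- 	count = 0
-- 	for key in d:
-- 		if d[key] >= 4:
-- 			count += 1
--
-- 	if 0 in d and d[0] == 2:
-- 		count += 1
--
-- 	return count
-- ===== SOURCE B (Python) =====
-- def count_bomb(cards):
-- 	cs = sorted(cards)
-- 	bombs = 0
-- 	i = 0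
-- 	n = len(cs)
-- 	while i < n:
-- 		j = i
-- 		while j < n and cs[j] == cs[i]:
-- 			j += 1
-- 		run = j - i
-- 		if run >= 4:
-- 			bombs += 1
-- 		if cs[i] == 0 and run == 2:
-- 			bombs += 1
-- 		i = j
-- 	return bombs
-- ===== Notes on version B (the rewrite author's own statement) =====
-- stated objective: alternative
-- what changed: Replaces the hash-frequency-dict plus distinct-key pass with sort-then-run-length-scan: sort the cards once, scan consecutive equal runs, count runs of length >= 4 and a zero-run of length exactly 2.
import Mathlib
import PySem

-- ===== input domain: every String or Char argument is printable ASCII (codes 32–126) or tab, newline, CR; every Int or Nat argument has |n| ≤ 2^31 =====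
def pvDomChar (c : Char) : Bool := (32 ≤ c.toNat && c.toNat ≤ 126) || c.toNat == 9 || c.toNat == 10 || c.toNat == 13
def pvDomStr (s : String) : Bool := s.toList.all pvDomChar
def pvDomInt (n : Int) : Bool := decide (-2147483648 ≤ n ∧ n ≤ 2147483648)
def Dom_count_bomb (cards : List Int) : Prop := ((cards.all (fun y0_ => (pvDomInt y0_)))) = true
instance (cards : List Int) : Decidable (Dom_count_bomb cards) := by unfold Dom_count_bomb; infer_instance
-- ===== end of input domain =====

-- B replaces A's hand-built frequency dict and distinct-key pass with sort-then-run-length-scan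
-- (objective: alternative algorithm of similar cost).

-- ===== PORT A =====
def count_bomb (cards : List Int) : Int :=
  let d : PySem.Dict Int Int := cards.foldl
    (fun d i => if d.contains i then d.insert i (d.getD i 0 + 1) else d.insert i 1)
    PySem.Dict.empty
  let count := d.keys.foldl (fun c key => if d.getD key 0 ≥ 4 then c + 1 else c) 0
  if d.contains 0 && d.getD 0 0 == 2 then count + 1 else count

-- ===== PORT B =====
-- the outer while loop of Source B: consume one run of equal cards per step
def runScan : List Int → Int
  | [] => 0
  | x :: xs =>
    let run : Int := 1 + (xs.takeWhile (fun y => y == x)).length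
    (if run ≥ 4 then 1 else 0) + (if x == 0 && run == 2 then 1 else 0)
      + runScan (xs.dropWhile (fun y => y == x))
termination_by cs => cs.length
decreasing_by
  simp only [List.length_cons]
  have := List.length_dropWhile_le (fun y => y == x) xs
  omega

def count_bomb_alt (cards : List Int) : Int :=
  runScan (PySem.List.sorted cards (fun x => x) false)

-- ===== PRECONDITION & SPEC =====
def Spec_count_bomb (cards : List Int) (out : Int) : Prop := out = count_bomb_alt cards
instance (cards : List Int) (out : Int) : Decidable (Spec_count_bomb cards out) := by unfold Spec_count_bomb; infer_instance

-- ===== CLAIM (what is proved, stated in full; the proofs are below) =====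
def Claim_equal_count_bomb : Prop := ∀ (cards : List Int), Dom_count_bomb cards → Spec_count_bomb cards (count_bomb cards)

-- ===== LEMMAS AND PROOFS =====

-- A's dict-building loop is the Counter loop.
theorem count_bomb_dict_eq_counter (cards : List Int) :
    cards.foldl
      (fun d i => if d.contains i then d.insert i (d.getD i 0 + 1) else d.insert i 1)
      PySem.Dict.empty = PySem.Dict.counter cards := by
  rw [← PySem.Dict.foldl_insert_getD_add_one_eq_counter]
  congr 1
  funext d i
  by_cases h : d.contains i
  · simp [h]
  · have h0 : d.contains i = false := by simpa using h
    rw [PySem.Dict.getD_of_not_contains (h := h0)]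
    simp [h0]

-- a conditional-increment fold counts the satisfying elements
theorem foldl_if_add_one (p : Int → Prop) [DecidablePred p] (l : List Int) (a : Int) :
    l.foldl (fun c k => if p k then c + 1 else c) a = a + (l.countP (fun k => decide (p k)) : Int) := by
  induction l generalizing a with
  | nil => simp
  | cons x xs ih =>
    by_cases h : p x <;> simp [h, ih] <;> push_cast <;> ring

-- characterisation of A: distinct values with count ≥ 4, plus the joker pair
theorem count_bomb_char (cards : List Int) :
    count_bomb cards
      = ((PySem.Set.ofList cards).countP (fun v => decide (4 ≤ cards.count v)) : Int)
        + (if cards.count 0 = 2 then 1 else 0) := by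
  simp only [count_bomb]
  rw [count_bomb_dict_eq_counter]
  simp only [PySem.Dict.keys_counter, PySem.Dict.getD_counter, PySem.Dict.contains_counter]
  rw [foldl_if_add_one (fun k => ((cards.count k : Int)) ≥ 4)]
  have hp : (fun k => decide ((cards.count k : Int) ≥ 4)) = (fun v => decide (4 ≤ cards.count v)) := by
    funext k
    by_cases h : 4 ≤ cards.count k
    · simp [h, show ((4:Int)) ≤ (cards.count k : Int) from by exact_mod_cast h]
    · have h' : ¬ ((4:Int)) ≤ (cards.count k : Int) := by exact_mod_cast h
      simp [h, h']
  rw [hp]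
  by_cases h2 : cards.count 0 = 2
  · have hm : (0:Int) ∈ cards := List.count_pos_iff.mp (by omega)
    simp [h2, hm]
  · have h2' : ((cards.count 0 : Int)) ≠ 2 := by exact_mod_cast h2
    simp [h2, h2']

-- every element of takeWhile (· == x) equals x
theorem mem_takeWhile_beq (x : Int) (xs : List Int) :
    ∀ y ∈ xs.takeWhile (fun y => y == x), y = x := by
  intro y hy
  have := List.mem_takeWhile_imp hy
  simpa using this

-- in a sorted list, x does not survive dropWhile (· == x) when x is a lower bound
theorem not_mem_dropWhile_beq (x : Int) :
    ∀ (xs : List Int), xs.Pairwise (· ≤ ·) → (∀ y ∈ xs, x ≤ y) →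
      x ∉ xs.dropWhile (fun y => y == x) := by
  intro xs
  induction xs with
  | nil => simp
  | cons y ys ih =>
    intro hp hb
    by_cases h : y = x
    · subst h
      simp only [List.dropWhile_cons, BEq.rfl]
      exact ih hp.of_cons (fun z hz => le_trans (hb y (by simp)) (List.rel_of_pairwise_cons hp hz))
    · have hbeq : (y == x) = false := by simpa using h
      simp only [List.dropWhile_cons, hbeq]
      intro hmem
      rcases List.mem_cons.mp (by simpa using hmem) with h1 | h1
      · exact h h1.symm
      · have h2 : y ≤ x := List.rel_of_pairwise_cons hp h1
        have h3 : x ≤ y := hb y (by simp)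
        exact h (le_antisymm h2 h3)

-- run-length characterisation: on a sorted list, runScan counts distinct values with
-- count ≥ 4 plus the joker pair
theorem runScan_char : ∀ (n : Nat) (cs : List Int), cs.length ≤ n → cs.Pairwise (· ≤ ·) →
    runScan cs
      = ((PySem.Set.ofList cs).countP (fun v => decide (4 ≤ cs.count v)) : Int)
        + (if cs.count 0 = 2 then 1 else 0) := by
  intro n
  induction n with
  | zero =>
    intro cs hlen _
    have : cs = [] := List.eq_nil_of_length_eq_zero (by omega)
    subst this
    simp [runScan]
  | succ n ih =>
    intro cs hlen hp
    match cs with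
    | [] => simp [runScan]
    | x :: xs =>
      -- notation for the run and the remainder
      set t := xs.takeWhile (fun y => y == x) with ht
      set r := xs.dropWhile (fun y => y == x) with hr
      have hxs : t ++ r = xs := List.takeWhile_append_dropWhile
      have htall : ∀ y ∈ t, y = x := mem_takeWhile_beq x xs
      have hxr : x ∉ r := by
        apply not_mem_dropWhile_beq x xs hp.of_cons
        intro y hy; exact List.rel_of_pairwise_cons hp hy
      have hrp : r.Pairwise (· ≤ ·) := hp.of_cons.sublist (List.dropWhile_sublist _)
      have hrlen : r.length ≤ n := by
        have : r.length ≤ xs.length := hr ▸ List.length_dropWhile_le (fun y => y == x) xs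
        simp only [List.length_cons] at hlen; omega
      -- counts in x :: xs
      have hcx : (x :: xs).count x = 1 + t.length := by
        rw [← hxs]
        have h1 : t.count x = t.length := List.count_eq_length.mpr (fun b hb => ((htall b hb).symm : x = b))
        have h2 : r.count x = 0 := List.count_eq_zero.mpr hxr
        simp [List.count_cons, h1, h2]
        omega
      have hcv : ∀ v : Int, v ≠ x → (x :: xs).count v = r.count v := by
        intro v hv
        rw [← hxs]
        have h1 : t.count v = 0 := List.count_eq_zero.mpr (fun hm => hv (htall v hm))
        simp [List.count_cons, h1, hv]
        exact Ne.symm hv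
      -- the distinct elements of x :: xs are x plus those of r
      have hperm : (PySem.Set.ofList (x :: xs)).Perm (x :: PySem.Set.ofList r) := by
        rw [List.perm_ext_iff_of_nodup (PySem.Set.nodup_ofList _)
          (List.nodup_cons.mpr ⟨fun hm => hxr ((PySem.Set.mem_ofList _ _).mp hm), PySem.Set.nodup_ofList r⟩)]
        intro a
        simp only [PySem.Set.mem_ofList, List.mem_cons, ← hxs, List.mem_append]
        constructor
        · rintro (h1 | h1 | h1)
          · exact Or.inl h1
          · exact Or.inl (htall a h1)
          · exact Or.inr h1
        · rintro (h1 | h1)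
          · exact Or.inl h1
          · exact Or.inr (Or.inr h1)
      -- countP step
      have hcountP : (PySem.Set.ofList (x :: xs)).countP (fun v => decide (4 ≤ (x :: xs).count v))
          = (if 4 ≤ (x :: xs).count x then 1 else 0)
            + (PySem.Set.ofList r).countP (fun v => decide (4 ≤ r.count v)) := by
        rw [hperm.countP_eq]
        rw [List.countP_cons]
        have hcong : (PySem.Set.ofList r).countP (fun v => decide (4 ≤ (x :: xs).count v))
            = (PySem.Set.ofList r).countP (fun v => decide (4 ≤ r.count v)) := by
          apply List.countP_congr
          intro a ha
          have hax : a ≠ x := fun h => hxr (h ▸ (PySem.Set.mem_ofList _ _).mp ha)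
          rw [hcv a hax]
        rw [hcong]
        by_cases h : 4 ≤ (x :: xs).count x <;> simp [h] <;> omega
      -- assemble
      rw [runScan]
      rw [ih r hrlen hrp]
      rw [hcountP]
      simp only [← ht, ← hr]
      by_cases hx0 : x = 0
      · subst hx0
        have hc0r : r.count 0 = 0 := List.count_eq_zero.mpr hxr
        rw [hcx, hc0r]
        simp only [BEq.rfl, Bool.true_and, beq_iff_eq]
        push_cast
        split_ifs <;> omega
      · have hb0 : (x == (0:Int)) = false := by simp [hx0]
        have hc0 : (x :: xs).count 0 = r.count 0 := hcv 0 (fun h => hx0 h.symm)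
        rw [hcx, hc0]
        simp only [hb0, Bool.false_and, Bool.false_eq_true, if_false]
        push_cast
        split_ifs <;> omega

-- ===== VERDICT (by name: the statement is the Claim_ definition above) =====
theorem count_bomb_spec : Claim_equal_count_bomb := by
  intro cards _
  unfold Spec_count_bomb count_bomb_alt
  have hs := PySem.List.sorted_perm cards (fun x => x) false
  have hpw : (PySem.List.sorted cards (fun x => x) false).Pairwise (· ≤ ·) := by
    have := PySem.List.sorted_pairwise cards (fun x => x)
    simpa using this
  rw [count_bomb_char, runScan_char (PySem.List.sorted cards (fun x => x) false).length _ le_rfl hpw]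
  have hcnt : ∀ v : Int, (PySem.List.sorted cards (fun x => x) false).count v = cards.count v :=
    fun v => hs.count_eq v
  have hsetperm : (PySem.Set.ofList (PySem.List.sorted cards (fun x => x) false)).Perm
      (PySem.Set.ofList cards) := by
    rw [List.perm_ext_iff_of_nodup (PySem.Set.nodup_ofList _) (PySem.Set.nodup_ofList _)]
    intro a
    simp only [PySem.Set.mem_ofList]
    exact ⟨fun h => hs.mem_iff.mp h, fun h => hs.mem_iff.mpr h⟩
  rw [show (fun v => decide (4 ≤ (PySem.List.sorted cards (fun x => x) false).count v))
      = (fun v => decide (4 ≤ cards.count v)) from by funext v; rw [hcnt]]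
  rw [hsetperm.countP_eq, hcnt]
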